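-- pv_equiv track=rewrite | github.com/practual/cartographers | game.py | lost_barony
-- ===== SOURCE A (Python) =====
-- def lost_barony(coords_to_terrain, terrain_to_coords):
--     biggest_squares = {}
--     for y in range(11):
--         for x in range(11):
--             if not x or not y:
--                 biggest_squares[(x, y)] = int(bool(coords_to_terrain.get((x, y))))
--             elif not coords_to_terrain.get((x, y)):
--                 biggest_squares[(x, y)] = 0
--             else:
--                 biggest_squares[(x, y)] = min(
--                     biggest_squares[(x - 1, y)],
--                     biggest_squares[(x, y - 1)],
--                     biggest_squares[(x - 1, y - 1)]
--                 ) + 1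
--     return max(biggest_squares.values()) * 3
-- ===== SOURCE B (Python) =====
-- def lost_barony(coords_to_terrain, terrain_to_coords):
--     best = 0
--     for y in range(11):
--         for x in range(11):
--             for s in range(1, 12):
--                 if x + s <= 11 and y + s <= 11 and all(
--                     coords_to_terrain.get((cx, cy))
--                     for cy in range(y, y + s)
--                     for cx in range(x, x + s)
--                 ):
--                     best = max(best, s)
--     return best * 3
-- ===== Notes on version B (the rewrite author's own statement) =====
-- stated objective: alternative
-- what changed: Replaces A's dynamic-programming table (dict of largest-square-ending-at-cell values built by the min-of-three-neighbours recurrence, then max of the table) with a direct brute-force search: for every top-left corner and every size s, test whether the whole s-by-s block is filled and keep the largest s.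
import Mathlib
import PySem

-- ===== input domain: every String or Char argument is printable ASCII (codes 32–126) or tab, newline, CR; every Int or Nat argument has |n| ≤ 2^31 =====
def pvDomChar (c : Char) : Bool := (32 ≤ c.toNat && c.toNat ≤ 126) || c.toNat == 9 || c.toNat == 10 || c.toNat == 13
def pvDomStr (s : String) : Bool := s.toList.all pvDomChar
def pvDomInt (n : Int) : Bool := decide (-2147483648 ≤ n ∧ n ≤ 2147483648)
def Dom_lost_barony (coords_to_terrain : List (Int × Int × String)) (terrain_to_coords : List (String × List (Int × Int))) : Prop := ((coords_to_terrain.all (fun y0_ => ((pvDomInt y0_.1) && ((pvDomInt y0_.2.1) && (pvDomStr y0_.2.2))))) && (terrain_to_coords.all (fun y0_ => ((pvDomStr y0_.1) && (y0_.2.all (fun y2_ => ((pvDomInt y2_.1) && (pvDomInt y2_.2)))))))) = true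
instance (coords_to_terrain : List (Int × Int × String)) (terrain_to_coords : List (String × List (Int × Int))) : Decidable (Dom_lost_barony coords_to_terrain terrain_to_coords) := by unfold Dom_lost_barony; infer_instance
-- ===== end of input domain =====

-- B replaces A's largest-square dynamic-programming table by a direct brute-force search
-- over every top-left corner and size (objective: alternative algorithm; not faster).

-- shared Python primitives: dict.get((x, y)) on the association list, and Python truthiness of the result
def pvGet (m : List (Int × Int × String)) (x y : Int) : Option String :=
  (m.find? (fun t => t.1 == x && t.2.1 == y)).map (fun t => t.2.2)

def pvTruthy (o : Option String) : Bool :=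
  match o with
  | none => false
  | some s => !s.toList.isEmpty

-- ===== PORT A =====
def lost_barony (coords_to_terrain : List (Int × Int × String)) (terrain_to_coords : List (String × List (Int × Int))) : Int :=
  let bs : PySem.Dict (Int × Int) Int :=
    (PySem.List.pyRange 0 11 1).foldl (fun d y =>
      (PySem.List.pyRange 0 11 1).foldl (fun d x =>
        if x == 0 || y == 0 then
          d.insert (x, y) (if pvTruthy (pvGet coords_to_terrain x y) then 1 else 0)
        else if !pvTruthy (pvGet coords_to_terrain x y) then
          d.insert (x, y) 0
        else
          -- biggest_squares[(x-1,y)] etc. are always present at this point; dict[k] ported as getD _ 0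
          d.insert (x, y) (min (min (d.getD (x - 1, y) 0) (d.getD (x, y - 1) 0)) (d.getD (x - 1, y - 1) 0) + 1))
        d)
      PySem.Dict.empty
  -- max(values): the dict always holds 121 entries, so Python's max never raises; ported as max? … getD 0
  ((PySem.List.max? bs.values (fun v => v)).getD 0) * 3

-- ===== PORT B =====
def lost_barony_alt (coords_to_terrain : List (Int × Int × String)) (terrain_to_coords : List (String × List (Int × Int))) : Int :=
  ((PySem.List.pyRange 0 11 1).foldl (fun best y =>
    (PySem.List.pyRange 0 11 1).foldl (fun best x =>
      (PySem.List.pyRange 1 12 1).foldl (fun best s =>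
        if decide (x + s ≤ 11) && decide (y + s ≤ 11) &&
           (PySem.List.pyRange y (y + s) 1).all (fun cy =>
             (PySem.List.pyRange x (x + s) 1).all (fun cx =>
               pvTruthy (pvGet coords_to_terrain cx cy)))
        then max best s else best)
        best)
      best)
    0) * 3

-- ===== PRECONDITION & SPEC =====
def Spec_lost_barony (coords_to_terrain : List (Int × Int × String)) (terrain_to_coords : List (String × List (Int × Int))) (out : Int) : Prop := out = lost_barony_alt coords_to_terrain terrain_to_coords
instance (coords_to_terrain : List (Int × Int × String)) (terrain_to_coords : List (String × List (Int × Int))) (out : Int) : Decidable (Spec_lost_barony coords_to_terrain terrain_to_coords out) := by unfold Spec_lost_barony; infer_instance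

-- ===== CLAIM (what is proved, stated in full; the proofs are below) =====
def Claim_equal_lost_barony : Prop := ∀ (coords_to_terrain : List (Int × Int × String)) (terrain_to_coords : List (String × List (Int × Int))), Dom_lost_barony coords_to_terrain terrain_to_coords → Spec_lost_barony coords_to_terrain terrain_to_coords (lost_barony coords_to_terrain terrain_to_coords)

-- ===== LEMMAS AND PROOFS =====

-- the largest-square-ending-at-(x,y) value that A's recurrence computes, as a pure function
def dpN (f : Nat → Nat → Bool) (x y : Nat) : Nat :=
  if f x y then
    if _h : x = 0 ∨ y = 0 then 1
    else min (min (dpN f (x - 1) y) (dpN f x (y - 1))) (dpN f (x - 1) (y - 1)) + 1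
  else 0
termination_by x + y
decreasing_by all_goals omega

-- "the s×s square with bottom-right corner (x,y) is fully filled"
def FullBR (f : Nat → Nat → Bool) (x y s : Nat) : Prop :=
  ∀ i < s, ∀ j < s, f (x - i) (y - j) = true

-- the 121 grid cells in the row-major order A's loops visit them
def rmList : List (Int × Int) :=
  (List.range 121).map (fun k => (((k % 11 : Nat) : Int), ((k / 11 : Nat) : Int)))

def fOf (ct : List (Int × Int × String)) (a b : Nat) : Bool := pvTruthy (pvGet ct (a : Int) (b : Int))

def gval (ct : List (Int × Int × String)) (c : Int × Int) : Int := (dpN (fOf ct) c.1.toNat c.2.toNat : Int)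

def stepA (ct : List (Int × Int × String)) (d : PySem.Dict (Int × Int) Int) (c : Int × Int) : PySem.Dict (Int × Int) Int :=
  if c.1 == 0 || c.2 == 0 then
    d.insert (c.1, c.2) (if pvTruthy (pvGet ct c.1 c.2) then 1 else 0)
  else if !pvTruthy (pvGet ct c.1 c.2) then
    d.insert (c.1, c.2) 0
  else
    d.insert (c.1, c.2) (min (min (d.getD (c.1 - 1, c.2) 0) (d.getD (c.1, c.2 - 1) 0)) (d.getD (c.1 - 1, c.2 - 1) 0) + 1)

def bestG (ct : List (Int × Int × String)) : Int := (rmList.map (gval ct)).foldl max 0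

-- dpN is bounded by the distance to each border
lemma dpN_le_min_aux (f : Nat → Nat → Bool) :
    ∀ (n : Nat), ∀ x y, x + y ≤ n → dpN f x y ≤ min x y + 1 := by
  intro n
  induction n using Nat.strong_induction_on with
  | _ n ih =>
    intro x y hxy
    rw [dpN]
    split_ifs with hf hb
    · omega
    · have h1 := ih (x - 1 + y) (by omega) (x - 1) y (by omega)
      have h2 := ih (x + (y - 1)) (by omega) x (y - 1) (by omega)
      omega
    · omega

lemma dpN_le_min (f : Nat → Nat → Bool) (x y : Nat) : dpN f x y ≤ min x y + 1 :=
  dpN_le_min_aux f (x + y) x y le_rfl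

-- the square of side dpN ending at (x,y) is fully filled
lemma dpN_fullBR_aux (f : Nat → Nat → Bool) :
    ∀ (n : Nat), ∀ x y, x + y ≤ n → FullBR f x y (dpN f x y) := by
  intro n
  induction n using Nat.strong_induction_on with
  | _ n ih =>
    intro x y hxy
    rw [dpN]
    split_ifs with hf hb
    · -- border, filled: square of side 1
      intro i hi j hj
      interval_cases i
      interval_cases j
      simpa using hf
    · -- main recurrence
      have hL := ih (x - 1 + y) (by omega) (x - 1) y (by omega)
      have hU := ih (x + (y - 1)) (by omega) x (y - 1) (by omega)
      have hD := ih (x - 1 + (y - 1)) (by omega) (x - 1) (y - 1) (by omega)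
      set m := min (min (dpN f (x - 1) y) (dpN f x (y - 1))) (dpN f (x - 1) (y - 1)) with hm
      intro i hi j hj
      by_cases hi0 : i = 0
      · subst hi0
        by_cases hj0 : j = 0
        · subst hj0; simpa using hf
        · have hmge : 1 ≤ m := by omega
          have := hU 0 (by omega) (j - 1) (by omega)
          have e : (y - 1) - (j - 1) = y - j := by omega
          rw [e] at this
          simpa using this
      · by_cases hjm : j < m
        · have := hL (i - 1) (by omega) j (by omega)
          have e : (x - 1) - (i - 1) = x - i := by omega
          rwa [e] at this
        · have hj' : j = m := by omega
          have hmge : 1 ≤ m := by omega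
          have := hD (i - 1) (by omega) (j - 1) (by omega)
          have e1 : (x - 1) - (i - 1) = x - i := by omega
          have e2 : (y - 1) - (j - 1) = y - j := by omega
          rwa [e1, e2] at this
    · intro i hi j hj
      omega

lemma dpN_fullBR (f : Nat → Nat → Bool) (x y : Nat) : FullBR f x y (dpN f x y) :=
  dpN_fullBR_aux f (x + y) x y le_rfl

-- dpN is the LARGEST such side
lemma le_dpN_aux (f : Nat → Nat → Bool) :
    ∀ (n : Nat), ∀ x y s, x + y ≤ n → s ≤ x + 1 → s ≤ y + 1 → FullBR f x y s →
      s ≤ dpN f x y := by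
  intro n
  induction n using Nat.strong_induction_on with
  | _ n ih =>
    intro x y s hxy hx hy h
    rcases Nat.eq_zero_or_pos s with rfl | hs
    · omega
    · have hf : f x y = true := by simpa using h 0 (by omega) 0 (by omega)
      rw [dpN]
      split_ifs with hf' hb
      · omega
      · have hL := ih (x - 1 + y) (by omega) (x - 1) y (s - 1) (by omega) (by omega) (by omega)
          (fun i hi j hj => by
            have := h (i + 1) (by omega) j (by omega)
            have e : x - (i + 1) = (x - 1) - i := by omega
            rwa [e] at this)
        have hU := ih (x + (y - 1)) (by omega) x (y - 1) (s - 1) (by omega) (by omega) (by omega)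
          (fun i hi j hj => by
            have := h i (by omega) (j + 1) (by omega)
            have e : y - (j + 1) = (y - 1) - j := by omega
            rwa [e] at this)
        have hD := ih (x - 1 + (y - 1)) (by omega) (x - 1) (y - 1) (s - 1) (by omega) (by omega) (by omega)
          (fun i hi j hj => by
            have := h (i + 1) (by omega) (j + 1) (by omega)
            have e1 : x - (i + 1) = (x - 1) - i := by omega
            have e2 : y - (j + 1) = (y - 1) - j := by omega
            rwa [e1, e2] at this)
        omega

lemma le_dpN (f : Nat → Nat → Bool) (x y s : Nat) (hx : s ≤ x + 1) (hy : s ≤ y + 1)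
    (h : FullBR f x y s) : s ≤ dpN f x y :=
  le_dpN_aux f (x + y) x y s le_rfl hx hy h

-- generic fold bounds
lemma foldl_infl {α : Type} (body : Int → α → Int) (h : ∀ b a, b ≤ body b a) :
    ∀ (l : List α) (init : Int), init ≤ l.foldl body init := by
  intro l
  induction l with
  | nil => intro init; simp
  | cons a t ih => intro init; exact le_trans (h init a) (ih (body init a))

lemma foldl_reach {α : Type} (body : Int → α → Int) (h : ∀ b a, b ≤ body b a)
    (l : List α) (a : α) (ha : a ∈ l) (v : Int) (hv : ∀ b, v ≤ body b a)
    (init : Int) : v ≤ l.foldl body init := by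
  induction l generalizing init with
  | nil => cases ha
  | cons x t ih =>
    rcases List.mem_cons.mp ha with rfl | hm
    · exact le_trans (hv init) (foldl_infl body h t _)
    · exact ih hm _

lemma foldl_ub {α : Type} (body : Int → α → Int) :
    ∀ (l : List α) (C init : Int), init ≤ C → (∀ b a, a ∈ l → b ≤ C → body b a ≤ C) →
      l.foldl body init ≤ C := by
  intro l
  induction l with
  | nil => intro C init h0 _; simpa
  | cons x t ih =>
    intro C init h0 h
    exact ih C _ (h init x List.mem_cons_self h0)
      (fun b a ha hb => h b a (List.mem_cons_of_mem _ ha) hb)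

lemma rm_length : rmList.length = 121 := by simp [rmList]

lemma rm_nodup : rmList.Nodup := by decide

lemma rm_getElem (k : Nat) (hk : k < 121) :
    rmList[k]'(by rw [rm_length]; omega) = (((k % 11 : Nat) : Int), ((k / 11 : Nat) : Int)) := by
  simp [rmList]

lemma rm_take_mem (n k : Nat) (hk : k < n) (hn : n ≤ 121) :
    rmList[k]'(by rw [rm_length]; omega) ∈ rmList.take n := by
  have h1 : (rmList.take n)[k]'(by simp [rm_length]; omega) = rmList[k]'(by rw [rm_length]; omega) :=
    List.getElem_take
  rw [← h1]
  exact List.getElem_mem _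

lemma rm_not_mem_take (n : Nat) (hn : n < 121) :
    rmList[n]'(by rw [rm_length]; omega) ∉ rmList.take n := by
  intro hmem
  obtain ⟨k, hk, hkeq⟩ := List.mem_iff_getElem.mp hmem
  have hk' : k < n := by simp [rm_length] at hk; omega
  rw [List.getElem_take] at hkeq
  have := (List.Nodup.getElem_inj_iff rm_nodup).mp hkeq
  omega

-- one loop-body step, at the cell of row-major index n = pre.length
lemma stepA_items (ct : List (Int × Int × String)) (pre suf : List (Int × Int))
    (d : PySem.Dict (Int × Int) Int) (c : Int × Int)
    (happ : pre ++ c :: suf = rmList)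
    (hitems : d.items = pre.map (fun c => (c, gval ct c))) :
    (stepA ct d c).items = (pre ++ [c]).map (fun c => (c, gval ct c)) := by
  have hlen : pre.length + (c :: suf).length = 121 := by
    have := congrArg List.length happ
    simpa [rm_length] using this
  have hn : pre.length < 121 := by simp at hlen; omega
  have hcn : rmList[pre.length]'(by rw [rm_length]; omega) = c := by
    rw [List.getElem_of_eq happ.symm, List.getElem_append_right (le_refl pre.length)]
    simp
  have hc : c = (((pre.length % 11 : Nat) : Int), ((pre.length / 11 : Nat) : Int)) := by
    rw [← hcn, rm_getElem _ hn]
  have hpre : pre = rmList.take pre.length := by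
    rw [← happ, List.take_left]
  have hkeys : d.keys = pre := by
    simp [PySem.Dict.keys, hitems, List.map_map, Function.comp_def]
  have hpreNodup : pre.Nodup := by
    rw [hpre]; exact List.Nodup.sublist (List.take_sublist _ _) rm_nodup
  have hnodup : d.keys.Nodup := by rw [hkeys]; exact hpreNodup
  have hcont : d.contains c = false := by
    rw [PySem.Dict.contains_eq_decide_mem_keys, hkeys, hpre, ← hcn]
    simp [rm_not_mem_take _ hn]
  have hgetD : ∀ c' ∈ pre, d.getD c' 0 = gval ct c' := by
    intro c' hm
    exact PySem.Dict.getD_of_mem_items d (by rw [hitems]; exact List.mem_map_of_mem hm) hnodup 0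
  set n := pre.length with hnd
  set a := n % 11 with had
  set b := n / 11 with hbd
  -- membership of the three neighbours, when they exist
  have hmemL : 1 ≤ a → (((a - 1 : Nat) : Int), ((b : Nat) : Int)) ∈ pre := by
    intro ha1
    rw [hpre]
    have := rm_take_mem n (n - 1) (by omega) (by omega)
    rwa [rm_getElem _ (by omega), show (n - 1) % 11 = a - 1 by omega,
      show (n - 1) / 11 = b by omega] at this
  have hmemU : 1 ≤ b → (((a : Nat) : Int), ((b - 1 : Nat) : Int)) ∈ pre := by
    intro hb1
    rw [hpre]
    have := rm_take_mem n (n - 11) (by omega) (by omega)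
    rwa [rm_getElem _ (by omega), show (n - 11) % 11 = a by omega,
      show (n - 11) / 11 = b - 1 by omega] at this
  have hmemD : 1 ≤ a → 1 ≤ b → (((a - 1 : Nat) : Int), ((b - 1 : Nat) : Int)) ∈ pre := by
    intro ha1 hb1
    rw [hpre]
    have := rm_take_mem n (n - 12) (by omega) (by omega)
    rwa [rm_getElem _ (by omega), show (n - 12) % 11 = a - 1 by omega,
      show (n - 12) / 11 = b - 1 by omega] at this
  subst hc
  simp only [List.map_append, List.map_cons, List.map_nil]
  have hgv : gval ct ((a : Int), (b : Int)) = ((dpN (fOf ct) a b : Nat) : Int) := by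
    simp [gval]
  rw [dpN] at hgv
  simp only [stepA]
  by_cases hb0 : a = 0 ∨ b = 0
  · have hcond : (((a : Nat) : Int) == 0 || ((b : Nat) : Int) == 0) = true := by
      rcases hb0 with h | h <;> simp [h]
    rw [if_pos hcond, PySem.Dict.items_insert_of_not_contains d _ hcont, hitems]
    rw [dif_pos hb0] at hgv
    have : (if pvTruthy (pvGet ct (a : Int) (b : Int)) then (1 : Int) else 0)
        = gval ct ((a : Int), (b : Int)) := by
      rw [hgv]
      have hfe : pvTruthy (pvGet ct (a : Int) (b : Int)) = fOf ct a b := rfl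
      rw [hfe]
      by_cases hf : fOf ct a b <;> simp [hf]
    rw [this]
  · have ha1 : 1 ≤ a := by omega
    have hb1 : 1 ≤ b := by omega
    have hcond : (((a : Nat) : Int) == 0 || ((b : Nat) : Int) == 0) = false := by
      simp; omega
    rw [if_neg (by simp [hcond])]
    rw [dif_neg hb0] at hgv
    by_cases hf : pvTruthy (pvGet ct (a : Int) (b : Int))
    · rw [if_neg (by simp [hf])]
      rw [PySem.Dict.items_insert_of_not_contains d _ hcont, hitems]
      have hfOf : fOf ct a b = true := hf
      rw [if_pos hfOf] at hgv
      have eL : ((a : Int) - 1, (b : Int)) = (((a - 1 : Nat) : Int), ((b : Nat) : Int)) := by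
        have : ((a - 1 : Nat) : Int) = (a : Int) - 1 := by omega
        rw [this]
      have eU : ((a : Int), (b : Int) - 1) = (((a : Nat) : Int), ((b - 1 : Nat) : Int)) := by
        have : ((b - 1 : Nat) : Int) = (b : Int) - 1 := by omega
        rw [this]
      have eD : ((a : Int) - 1, (b : Int) - 1)
          = (((a - 1 : Nat) : Int), ((b - 1 : Nat) : Int)) := by
        have h1 : ((a - 1 : Nat) : Int) = (a : Int) - 1 := by omega
        have h2 : ((b - 1 : Nat) : Int) = (b : Int) - 1 := by omega
        rw [h1, h2]
      rw [eL, eU, eD, hgetD _ (hmemL ha1), hgetD _ (hmemU hb1), hgetD _ (hmemD ha1 hb1)]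
      have gL : gval ct (((a - 1 : Nat) : Int), ((b : Nat) : Int)) = ((dpN (fOf ct) (a - 1) b : Nat) : Int) := by simp [gval]
      have gU : gval ct (((a : Nat) : Int), ((b - 1 : Nat) : Int)) = ((dpN (fOf ct) a (b - 1) : Nat) : Int) := by simp [gval]
      have gD : gval ct (((a - 1 : Nat) : Int), ((b - 1 : Nat) : Int)) = ((dpN (fOf ct) (a - 1) (b - 1) : Nat) : Int) := by simp [gval]
      rw [gL, gU, gD, hgv]
      push_cast
      rfl
    · rw [if_pos (by simp [hf])]
      rw [PySem.Dict.items_insert_of_not_contains d _ hcont, hitems]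
      have hfOf : fOf ct a b = false := by simpa [fOf] using hf
      rw [if_neg (by simp [hfOf])] at hgv
      rw [hgv]
      simp

-- the dict-building loop: items invariant along the row-major order
lemma foldA_items (ct : List (Int × Int × String)) :
    ∀ (suf pre : List (Int × Int)) (d : PySem.Dict (Int × Int) Int),
      pre ++ suf = rmList →
      d.items = pre.map (fun c => (c, gval ct c)) →
      (suf.foldl (stepA ct) d).items = rmList.map (fun c => (c, gval ct c)) := by
  intro suf
  induction suf with
  | nil =>
    intro pre d happ hitems
    rw [List.foldl_nil, hitems, ← List.append_nil pre, happ]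
  | cons c suf ih =>
    intro pre d happ hitems
    rw [List.foldl_cons]
    exact ih (pre ++ [c]) _ (by simpa [List.append_assoc] using happ)
      (stepA_items ct pre suf d c happ hitems)

lemma foldl_foldl_pairs {γ : Type} (g : γ → Int → Int → γ) :
    ∀ (l1 l2 : List Int) (init : γ),
      l1.foldl (fun d y => l2.foldl (fun d x => g d x y) d) init
        = (l1.flatMap (fun y => l2.map (fun x => (x, y)))).foldl (fun d c => g d c.1 c.2) init := by
  intro l1
  induction l1 with
  | nil => simp
  | cons y t ih =>
    intro l2 init
    simp [List.flatMap_cons, List.foldl_append, List.foldl_map, ih]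

lemma maxD0_eq_foldl (l : List Int) (h : ∀ v ∈ l, 0 ≤ v) :
    (PySem.List.max? l (fun v => v)).getD 0 = l.foldl max 0 := by
  cases l with
  | nil => rfl
  | cons a t =>
    rw [PySem.List.max?_id_cons]
    have h0 : max 0 a = a := max_eq_right (h a List.mem_cons_self)
    simp [List.foldl_cons, h0]

lemma A_eq (ct : List (Int × Int × String)) (tt : List (String × List (Int × Int))) :
    lost_barony ct tt = bestG ct * 3 := by
  have h1 : lost_barony ct tt
      = ((PySem.List.max? ((PySem.List.pyRange 0 11 1).foldl
          (fun d y => (PySem.List.pyRange 0 11 1).foldl (fun d x => stepA ct d (x, y)) d)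
          PySem.Dict.empty).values (fun v => v)).getD 0) * 3 := rfl
  have hfold :
      ((PySem.List.pyRange 0 11 1).foldl
        (fun d y => (PySem.List.pyRange 0 11 1).foldl (fun d x => stepA ct d (x, y)) d)
        PySem.Dict.empty)
        = rmList.foldl (stepA ct) PySem.Dict.empty := by
    rw [foldl_foldl_pairs (fun d x y => stepA ct d (x, y))]
    have hl : ((PySem.List.pyRange 0 11 1).flatMap
        (fun y => (PySem.List.pyRange 0 11 1).map (fun x => (x, y)))) = rmList := by decide
    rw [hl]
  rw [h1, hfold]
  have hitems := foldA_items ct rmList [] PySem.Dict.empty (by simp) (by rfl)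
  have hvals : (rmList.foldl (stepA ct) PySem.Dict.empty).values = rmList.map (gval ct) := by
    simp [PySem.Dict.values, hitems, List.map_map, Function.comp_def]
  rw [hvals, maxD0_eq_foldl _ ?hnn]
  · rfl
  case hnn =>
    intro v hv
    obtain ⟨c, _, rfl⟩ := List.mem_map.mp hv
    exact Int.natCast_nonneg _

def condB (ct : List (Int × Int × String)) (x y s : Int) : Bool :=
  decide (x + s ≤ 11) && decide (y + s ≤ 11) &&
    (PySem.List.pyRange y (y + s) 1).all (fun cy =>
      (PySem.List.pyRange x (x + s) 1).all (fun cx => pvTruthy (pvGet ct cx cy)))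

def bodyS (ct : List (Int × Int × String)) (x y : Int) : Int → Int → Int :=
  fun best s => if condB ct x y s then max best s else best

def bodyX (ct : List (Int × Int × String)) (y : Int) : Int → Int → Int :=
  fun best x => (PySem.List.pyRange 1 12 1).foldl (bodyS ct x y) best

def bodyY (ct : List (Int × Int × String)) : Int → Int → Int :=
  fun best y => (PySem.List.pyRange 0 11 1).foldl (bodyX ct y) best

def bestB (ct : List (Int × Int × String)) : Int :=
  (PySem.List.pyRange 0 11 1).foldl (bodyY ct) 0

lemma bodyS_infl (ct : List (Int × Int × String)) (x y : Int) :
    ∀ b s, b ≤ bodyS ct x y b s := by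
  intro b s
  unfold bodyS
  split
  · exact le_max_left _ _
  · exact le_rfl

lemma bodyX_infl (ct : List (Int × Int × String)) (y : Int) :
    ∀ b x, b ≤ bodyX ct y b x :=
  fun b x => foldl_infl _ (bodyS_infl ct x y) _ b

lemma bodyY_infl (ct : List (Int × Int × String)) :
    ∀ b y, b ≤ bodyY ct b y :=
  fun b y => foldl_infl _ (bodyX_infl ct y) _ b

lemma bestB_nonneg (ct : List (Int × Int × String)) : 0 ≤ bestB ct :=
  foldl_infl _ (bodyY_infl ct) _ 0

lemma bestG_nonneg (ct : List (Int × Int × String)) : 0 ≤ bestG ct :=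
  foldl_infl max (fun b a => le_max_left b a) _ 0

lemma rm_mem (a b : Nat) (ha : a ≤ 10) (hb : b ≤ 10) :
    (((a : Nat) : Int), ((b : Nat) : Int)) ∈ rmList := by
  unfold rmList
  refine List.mem_map.mpr ⟨b * 11 + a, List.mem_range.mpr (by omega), ?_⟩
  rw [show (b * 11 + a) % 11 = a by omega, show (b * 11 + a) / 11 = b by omega]

lemma gval_le_bestG (ct : List (Int × Int × String)) (a b : Nat) (ha : a ≤ 10) (hb : b ≤ 10) :
    ((dpN (fOf ct) a b : Nat) : Int) ≤ bestG ct := by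
  have hmem : ((dpN (fOf ct) a b : Nat) : Int) ∈ rmList.map (gval ct) := by
    refine List.mem_map.mpr ⟨(((a : Nat) : Int), ((b : Nat) : Int)), rm_mem a b ha hb, ?_⟩
    simp [gval]
  exact (PySem.List.le_foldl_max (rmList.map (gval ct)) 0).2 _ hmem

-- from a true brute-force condition, a filled bottom-right square and hence a dpN lower bound
lemma condB_elim (ct : List (Int × Int × String)) (x y s : Int)
    (hx0 : 0 ≤ x) (hy0 : 0 ≤ y) (hs : 1 ≤ s) (hc : condB ct x y s = true) :
    x + s ≤ 11 ∧ y + s ≤ 11 ∧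
      s.toNat ≤ dpN (fOf ct) (x + s - 1).toNat (y + s - 1).toNat := by
  unfold condB at hc
  simp only [Bool.and_eq_true, decide_eq_true_eq, List.all_eq_true] at hc
  obtain ⟨⟨hxb, hyb⟩, hall⟩ := hc
  refine ⟨hxb, hyb, ?_⟩
  apply le_dpN
  · omega
  · omega
  · intro i hi j hj
    have hcy : (((y + s - 1).toNat - j : Nat) : Int) ∈ PySem.List.pyRange y (y + s) 1 := by
      rw [PySem.List.mem_pyRange_one]
      omega
    have hcx : (((x + s - 1).toNat - i : Nat) : Int) ∈ PySem.List.pyRange x (x + s) 1 := by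
      rw [PySem.List.mem_pyRange_one]
      omega
    exact hall _ hcy _ hcx

-- from a filled bottom-right square, the brute-force condition at its top-left corner
lemma condB_intro (ct : List (Int × Int × String)) (a b d : Nat)
    (hd : 1 ≤ d) (hda : d ≤ a + 1) (hdb : d ≤ b + 1) (ha : a ≤ 10) (hb : b ≤ 10)
    (hfull : FullBR (fOf ct) a b d) :
    condB ct ((a + 1 - d : Nat) : Int) ((b + 1 - d : Nat) : Int) ((d : Nat) : Int) = true := by
  unfold condB
  simp only [Bool.and_eq_true, decide_eq_true_eq, List.all_eq_true]
  refine ⟨⟨by omega, by omega⟩, ?_⟩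
  intro cy hcy cx hcx
  rw [PySem.List.mem_pyRange_one] at hcy hcx
  obtain ⟨i, hi, rfl⟩ : ∃ i : Nat, i < d ∧ cx = ((a + 1 - d + i : Nat) : Int) :=
    ⟨(cx - ((a + 1 - d : Nat) : Int)).toNat, by omega, by omega⟩
  obtain ⟨j, hj, rfl⟩ : ∃ j : Nat, j < d ∧ cy = ((b + 1 - d + j : Nat) : Int) :=
    ⟨(cy - ((b + 1 - d : Nat) : Int)).toNat, by omega, by omega⟩
  have := hfull (d - 1 - i) (by omega) (d - 1 - j) (by omega)
  rw [show a - (d - 1 - i) = a + 1 - d + i by omega,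
    show b - (d - 1 - j) = b + 1 - d + j by omega] at this
  exact this

lemma bestB_le_bestG (ct : List (Int × Int × String)) : bestB ct ≤ bestG ct := by
  apply foldl_ub (bodyY ct) _ _ _ (bestG_nonneg ct)
  intro b y hy hb
  apply foldl_ub (bodyX ct y) _ _ _ hb
  intro b2 x hx hb2
  apply foldl_ub (bodyS ct x y) _ _ _ hb2
  intro b3 s hs hb3
  unfold bodyS
  split
  case isTrue hc =>
    rw [PySem.List.mem_pyRange_one] at hy hx hs
    obtain ⟨hxb, hyb, hdp⟩ := condB_elim ct x y s (by omega) (by omega) (by omega) hc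
    have hXle : (x + s - 1).toNat ≤ 10 := by omega
    have hYle : (y + s - 1).toNat ≤ 10 := by omega
    have := gval_le_bestG ct _ _ hXle hYle
    have hsle : s ≤ ((dpN (fOf ct) (x + s - 1).toNat (y + s - 1).toNat : Nat) : Int) := by omega
    exact max_le hb3 (le_trans hsle this)
  case isFalse => exact hb3

lemma bestG_le_bestB (ct : List (Int × Int × String)) : bestG ct ≤ bestB ct := by
  apply foldl_ub max _ _ _ (bestB_nonneg ct)
  intro b v hv hb
  refine max_le hb ?_
  obtain ⟨c, hc, rfl⟩ := List.mem_map.mp hv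
  unfold rmList at hc
  obtain ⟨k, hk, rfl⟩ := List.mem_map.mp hc
  rw [List.mem_range] at hk
  have hgv : gval ct (((k % 11 : Nat) : Int), ((k / 11 : Nat) : Int))
      = ((dpN (fOf ct) (k % 11) (k / 11) : Nat) : Int) := by
    simp only [gval, Int.toNat_natCast]
  rw [hgv]
  set a := k % 11 with had
  set b' := k / 11 with hbd
  set d := dpN (fOf ct) a b' with hdd
  rcases Nat.eq_zero_or_pos d with hd0 | hd1
  · rw [hd0]; exact_mod_cast bestB_nonneg ct
  · have hmin : d ≤ min a b' + 1 := dpN_le_min (fOf ct) a b'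
    have ha10 : a ≤ 10 := by omega
    have hb10 : b' ≤ 10 := by omega
    apply foldl_reach (bodyY ct) (bodyY_infl ct) _ (((b' + 1 - d : Nat) : Int))
      (by rw [PySem.List.mem_pyRange_one]; omega)
    intro binit
    apply foldl_reach (bodyX ct _) (bodyX_infl ct _) _ (((a + 1 - d : Nat) : Int))
      (by rw [PySem.List.mem_pyRange_one]; omega)
    intro b2
    apply foldl_reach (bodyS ct _ _) (bodyS_infl ct _ _) _ ((d : Nat) : Int)
      (by rw [PySem.List.mem_pyRange_one]; omega)
    intro b3
    unfold bodyS
    rw [if_pos (condB_intro ct a b' d (by omega) (by omega) (by omega) ha10 hb10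
      (hdd ▸ dpN_fullBR (fOf ct) a b'))]
    exact le_max_right _ _

lemma B_eq_bestG (ct : List (Int × Int × String)) (tt : List (String × List (Int × Int))) :
    lost_barony_alt ct tt = bestG ct * 3 := by
  have h1 : lost_barony_alt ct tt = bestB ct * 3 := rfl
  rw [h1, le_antisymm (bestB_le_bestG ct) (bestG_le_bestB ct)]

-- ===== VERDICT (by name: the statement is the Claim_ definition above) =====
theorem lost_barony_spec : Claim_equal_lost_barony := by
  intro ct tt _
  unfold Spec_lost_barony
  rw [A_eq, B_eq_bestG]
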